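-- pv_equiv track=rewrite | github.com/swansonk14/IntroML | Labs/Lab2Solutions/lab2.py | bigram_dictionary
-- ===== SOURCE A (Python) =====
-- from string import punctuation, digits
--
-- def extract_words(input_string):
--     """Returns a list of lowercase words in the string.
--
--     Also separates punctuation and digits with spaces.
--
--     Arguments:
--         input_string(str): A string.
--
--     Returns:
--         A list of words with punctuation and digits separated.
--     """
--
--     for c in punctuation + digits:
--         input_string = input_string.replace(c, ' ' + c + ' ')
--
--     return input_string.lower().split()
--
-- def bigram_dictionary(reviews):
--     """Creates a bigram dictionary from the reviews.
--
--     Arguments: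
--         reviews(list): A list of strings.
--
--     Returns:
--         A dictionary which maps each bigram
--         in the text to a unique index.
--     """
--
--     bigram_dictionary = {}
--
--     for text in reviews:
--         word_list = extract_words(text)
--
--         for i in range(len(word_list) - 1):
--             bigram = (word_list[i], word_list[i+1])
--
--             if bigram not in bigram_dictionary:
--                 bigram_dictionary[bigram] = len(bigram_dictionary)
--
--     return bigram_dictionary
-- ===== SOURCE B (Python) =====
-- from string import punctuation, digits
--
-- def extract_words(input_string):
--     """Returns a list of lowercase words in the string."""
--     for c in punctuation + digits:
--         input_string = input_string.replace(c, ' ' + c + ' ')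
--     return input_string.lower().split()
--
-- def bigram_dictionary(reviews):
--     """Maps each bigram in the reviews to a unique index (first-appearance order).
--
--     Algorithm: flatten all bigrams into one stream; compute each distinct
--     bigram's FIRST occurrence position by a single backward sweep that
--     overwrites; rank the distinct bigrams by sorting on that position.
--     """
--     stream = []
--     for text in reviews:
--         words = extract_words(text)
--         stream += list(zip(words, words[1:]))
--     first = {}
--     for pos in range(len(stream) - 1, -1, -1):
--         first[stream[pos]] = pos
--     return {bg: i for i, bg in enumerate(sorted(first, key=first.get))}
-- ===== Notes on version B (the rewrite author's own statement) =====
-- stated objective: alternative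
-- what changed: B flattens all bigrams into one stream, computes each distinct bigram's first-occurrence position by a single backward overwrite sweep, and obtains the indices by sorting the distinct bigrams on that position, instead of A's incremental dict with an in-loop membership test and running length.
import Mathlib
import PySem

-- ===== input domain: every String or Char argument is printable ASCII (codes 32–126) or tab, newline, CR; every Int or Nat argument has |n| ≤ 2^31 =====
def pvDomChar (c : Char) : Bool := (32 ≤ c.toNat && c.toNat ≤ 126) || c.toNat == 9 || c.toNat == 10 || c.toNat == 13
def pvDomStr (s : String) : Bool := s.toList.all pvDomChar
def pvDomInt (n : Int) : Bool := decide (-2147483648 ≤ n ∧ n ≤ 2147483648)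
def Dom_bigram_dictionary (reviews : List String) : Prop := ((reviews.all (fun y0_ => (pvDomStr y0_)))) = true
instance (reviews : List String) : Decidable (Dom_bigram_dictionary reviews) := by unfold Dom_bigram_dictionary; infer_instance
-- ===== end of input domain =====

-- B flattens every bigram into one stream, finds each distinct bigram's first-occurrence
-- position with a single backward overwrite sweep, and ranks the distinct bigrams by
-- sorting on that position, instead of A's incremental dict with an in-loop membership
-- test and running length; objective: an alternative (sort-based ranking) algorithm.
-- The Python dict (bigram → index) is the assoc list of flattened triples (w1, w2, idx).

-- ===== PORT A =====
-- string.punctuation + string.digits, shared helper extract_words (identical in A and B)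
def pvSpecials : List Char := ("!\"#$%&'()*+,-./:;<=>?@[\\]^_`{|}~0123456789").toList

def extractWords (s : String) : List String :=
  PySem.Str.split₀ (PySem.Str.lower (pvSpecials.foldl
    (fun t c => PySem.Str.replace t (String.ofList [c]) (String.ofList [' ', c, ' '])) s))

def bigram_dictionary (reviews : List String) : List (String × String × Int) :=
  reviews.foldl (fun d text =>
    let ws := extractWords text
    (PySem.List.pyRange 0 ((ws.length : Int) - 1) 1).foldl (fun d i =>
      let bg := (PySem.List.pyGetD ws i "", PySem.List.pyGetD ws (i + 1) "")
      if d.any (fun e => e.1 == bg.1 && e.2.1 == bg.2) then d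
      else d ++ [(bg.1, bg.2, (d.length : Int))]) d) []

-- ===== PORT B =====
-- 'sorted(first, key=first.get)': every iterated key is present in 'first', so
-- Python's first.get returns its int value; ported as Dict.getD with default 0.
def bigram_dictionary_alt (reviews : List String) : List (String × String × Int) :=
  let stream := reviews.foldl (fun acc text =>
    let ws := extractWords text
    acc ++ ws.zip (PySem.List.slice ws (some 1) none)) []
  let first := (PySem.List.pyRange ((stream.length : Int) - 1) (-1) (-1)).foldl
    (fun d pos => d.insert (PySem.List.pyGetD stream pos ("", "")) pos)
    (PySem.Dict.empty : PySem.Dict (String × String) Int)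
  (PySem.List.enumerate
      (PySem.List.sorted first.keys (fun bg => first.getD bg 0) false) 0).map
    (fun p => (p.2.1, p.2.2, p.1))

-- ===== PRECONDITION & SPEC =====
def Spec_bigram_dictionary (reviews : List String) (out : List (String × String × Int)) : Prop := out = bigram_dictionary_alt reviews
instance (reviews : List String) (out : List (String × String × Int)) : Decidable (Spec_bigram_dictionary reviews out) := by unfold Spec_bigram_dictionary; infer_instance

-- ===== CLAIM (what is proved, stated in full; the proofs are below) =====
def Claim_equal_bigram_dictionary : Prop := ∀ (reviews : List String), Dom_bigram_dictionary reviews → Spec_bigram_dictionary reviews (bigram_dictionary reviews)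

-- ===== LEMMAS AND PROOFS =====

-- A's dict-insertion step on the flattened assoc list
def bdStep (d : List (String × String × Int)) (bg : String × String) : List (String × String × Int) :=
  if d.any (fun e => e.1 == bg.1 && e.2.1 == bg.2) then d
  else d ++ [(bg.1, bg.2, (d.length : Int))]

-- the flattened-triples view of a list of bigrams
def bdTriples (s : List (String × String)) : List (String × String × Int) :=
  (PySem.List.enumerate s 0).map (fun p => (p.2.1, p.2.2, p.1))

theorem bdTriples_any_aux (bg : String × String) (s : List (String × String)) (n : Int) :
    ((PySem.List.enumerate s n).map (fun p => (p.2.1, p.2.2, p.1))).any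
      (fun e => e.1 == bg.1 && e.2.1 == bg.2)
    = s.any (fun x => x == bg) := by
  induction s generalizing n with
  | nil => simp
  | cons y u ih =>
    rcases y with ⟨y1, y2⟩
    rcases bg with ⟨b1, b2⟩
    simp only [PySem.List.enumerate_cons, List.map_cons, List.any_cons, ih]
    rfl

theorem bdTriples_any (s : List (String × String)) (bg : String × String) :
    (bdTriples s).any (fun e => e.1 == bg.1 && e.2.1 == bg.2) = decide (bg ∈ s) := by
  rw [bdTriples, bdTriples_any_aux, List.any_beq', List.contains_eq_mem]

theorem bdStep_triples (s : List (String × String)) (bg : String × String) :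
    bdStep (bdTriples s) bg = bdTriples (PySem.Set.add s bg) := by
  rw [bdStep, bdTriples_any, PySem.Set.add_eq_ite]
  by_cases hm : bg ∈ s
  · simp [hm]
  · simp only [hm, decide_false, Bool.false_eq_true, if_false]
    simp [bdTriples, PySem.List.enumerate_append, PySem.List.enumerate_cons,
      PySem.List.enumerate_nil, PySem.List.length_enumerate]

theorem bdFold_triples (bs : List (String × String)) (s : List (String × String)) :
    bs.foldl bdStep (bdTriples s) = bdTriples (bs.foldl PySem.Set.add s) := by
  induction bs generalizing s with
  | nil => rfl
  | cons b t ih => simp only [List.foldl_cons, bdStep_triples, ih]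

-- the inner index loop of A is the fold of bdStep over the zipped bigram list
theorem bd_range_fold (ws : List String) (d : List (String × String × Int)) :
    (PySem.List.pyRange 0 ((ws.length : Int) - 1) 1).foldl
      (fun d i => bdStep d (PySem.List.pyGetD ws i "", PySem.List.pyGetD ws (i + 1) "")) d
    = (ws.zip ws.tail).foldl bdStep d := by
  have hnat : ∀ (ws : List String) (d : List (String × String × Int)),
      (List.range (ws.length - 1)).foldl
        (fun d k => bdStep d (ws.getD k "", ws.getD (k + 1) "")) d
      = (ws.zip ws.tail).foldl bdStep d := by
    intro ws
    induction ws with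
    | nil => intro d; rfl
    | cons x t iht =>
      intro d
      match t, iht with
      | [], _ => rfl
      | y :: u, iht =>
        simp only [List.length_cons, Nat.add_sub_cancel, List.range_succ_eq_map,
          List.foldl_cons, List.foldl_map, List.zip_cons_cons, List.tail_cons]
        have := iht (bdStep d (x, y))
        simp only [List.length_cons, Nat.add_sub_cancel] at this
        simpa [List.getD] using this
  rw [PySem.List.pyRange_one]
  have hlen : (((ws.length : Int) - 1) - 0).toNat = ws.length - 1 := by omega
  rw [hlen, List.foldl_map, ← hnat ws d]
  apply PySem.List.foldl_congr_mem
  intro acc k _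
  have h1 : (0 : Int) + (k : Int) = ((k : Nat) : Int) := by omega
  rw [h1]
  have h2 : ((k : Nat) : Int) + 1 = (((k + 1 : Nat)) : Int) := by push_cast; ring
  rw [h2, PySem.List.pyGetD_natCast, PySem.List.pyGetD_natCast]

theorem bd_nested_fold (g : String → List (String × String)) (l : List String)
    (init : List (String × String × Int)) :
    l.foldl (fun d t => (g t).foldl bdStep d) init = (l.flatMap g).foldl bdStep init := by
  induction l generalizing init with
  | nil => rfl
  | cons t r ih => simp only [List.foldl_cons, List.flatMap_cons, List.foldl_append, ih]

-- A computes the triples of the ordered dedup of the flat bigram stream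
theorem bd_A_eq (reviews : List String) :
    bigram_dictionary reviews
      = bdTriples (PySem.List.dedup
          (reviews.flatMap (fun t => (extractWords t).zip (extractWords t).tail))) := by
  unfold bigram_dictionary
  have hinner : (fun (d : List (String × String × Int)) (text : String) =>
      let ws := extractWords text
      (PySem.List.pyRange 0 ((ws.length : Int) - 1) 1).foldl (fun d i =>
        let bg := (PySem.List.pyGetD ws i "", PySem.List.pyGetD ws (i + 1) "")
        if d.any (fun e => e.1 == bg.1 && e.2.1 == bg.2) then d
        else d ++ [(bg.1, bg.2, (d.length : Int))]) d)
      = fun d text => ((extractWords text).zip (extractWords text).tail).foldl bdStep d := by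
    funext d text
    exact bd_range_fold (extractWords text) d
  rw [hinner, bd_nested_fold]
  have h0 : (([] : List (String × String × Int)))
      = bdTriples ([] : List (String × String)) := rfl
  rw [h0, bdFold_triples, ← PySem.Set.ofList_eq_foldl, ← PySem.List.dedup_eq_ofList]

-- ---- B side: the backward sweep builds the first-occurrence dictionary ----

-- Nat-indexed form of B's backward position loop (positions n-1, n-2, …, 0)
def buildFirst (stream : List (String × String)) :
    Nat → PySem.Dict (String × String) Int → PySem.Dict (String × String) Int
  | 0, d => d
  | n + 1, d => buildFirst stream n (d.insert (stream.getD n ("", "")) ((n : Nat) : Int))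

theorem buildFirst_eq_pyRange (stream : List (String × String)) (n : Nat)
    (d : PySem.Dict (String × String) Int) :
    (PySem.List.pyRange ((n : Int) - 1) (-1) (-1)).foldl
      (fun d pos => d.insert (PySem.List.pyGetD stream pos ("", "")) pos) d
    = buildFirst stream n d := by
  induction n generalizing d with
  | zero => rw [PySem.List.pyRange_neg_one_eq_nil (by norm_num)]; rfl
  | succ m ih =>
    rw [show ((m + 1 : Nat) : Int) - 1 = (m : Int) by push_cast; ring,
      PySem.List.pyRange_neg_one_cons (by omega), List.foldl_cons,
      PySem.List.pyGetD_natCast, show (m : Int) - 1 = (m : Int) - 1 from rfl]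
    exact ih _

theorem buildFirst_get? (stream : List (String × String)) (n : Nat)
    (hn : n ≤ stream.length) (d : PySem.Dict (String × String) Int)
    (bg : String × String) :
    (buildFirst stream n d).get? bg
      = if bg ∈ stream.take n then some (((stream.take n).idxOf bg : Nat) : Int)
        else d.get? bg := by
  induction n generalizing d with
  | zero => simp [buildFirst]
  | succ m ih =>
    have hm : m < stream.length := by omega
    have htake : stream.take (m + 1) = stream.take m ++ [stream[m]] :=
      List.take_succ_eq_append_getElem hm
    have hgetD : stream.getD m ("", "") = stream[m] := by
      simp [List.getD, List.getElem?_eq_getElem hm]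
    rw [buildFirst, ih (by omega), htake, hgetD]
    by_cases hmem : bg ∈ stream.take m
    · simp only [hmem, if_true, List.mem_append, true_or, if_true,
        List.idxOf_append_of_mem hmem]
    · simp only [hmem, if_false]
      rw [PySem.Dict.get?_insert]
      by_cases heq : bg = stream[m]
      · have hmem' : bg ∈ stream.take m ++ [stream[m]] :=
          List.mem_append.mpr (Or.inr (by simp [heq]))
        rw [if_pos heq, if_pos hmem']
        have hnm : stream[m] ∉ stream.take m := heq ▸ hmem
        rw [heq, List.idxOf_append_of_notMem hnm]
        simp [List.length_take, Nat.min_eq_left (le_of_lt hm)]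
      · have hmem' : ¬ (bg ∈ stream.take m ++ [stream[m]]) := fun h => by
          rcases List.mem_append.mp h with h | h
          · exact hmem h
          · exact heq (by simpa using h)
        rw [if_neg heq, if_neg hmem']

theorem buildFirst_nodup_keys (stream : List (String × String)) (n : Nat)
    (d : PySem.Dict (String × String) Int) (hd : d.keys.Nodup) :
    (buildFirst stream n d).keys.Nodup := by
  induction n generalizing d with
  | zero => exact hd
  | succ m ih => exact ih _ (PySem.Dict.nodup_keys_insert _ _ _ hd)

theorem buildFirst_mem_keys (stream : List (String × String)) (n : Nat)
    (hn : n ≤ stream.length) (bg : String × String) :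
    bg ∈ (buildFirst stream n PySem.Dict.empty).keys ↔ bg ∈ stream.take n := by
  rw [← PySem.Dict.contains_iff_mem_keys]
  have h := buildFirst_get? stream n hn PySem.Dict.empty bg
  by_cases hmem : bg ∈ stream.take n
  · simp only [hmem, if_true] at h
    constructor
    · intro _; exact hmem
    · intro _
      by_contra hc
      have := (PySem.Dict.get?_eq_none_iff_contains _ _).2 (by
        cases hb : (buildFirst stream n PySem.Dict.empty).contains bg
        · rfl
        · exact absurd hb (by simpa using hc))
      rw [h] at this; exact Option.some_ne_none _ this
  · simp only [hmem, if_false, PySem.Dict.get?_empty] at h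
    constructor
    · intro hc
      exact absurd ((PySem.Dict.get?_eq_none_iff_contains _ _).1 h) (by simpa using hc)
    · intro hc; exact absurd hc hmem

-- ordered dedup is strictly increasing in first-occurrence position
theorem dedup_pairwise_idxOf (stream : List (String × String)) :
    (PySem.List.dedup stream).Pairwise (fun a b => stream.idxOf a < stream.idxOf b) := by
  induction stream using List.reverseRecOn with
  | nil => simp [PySem.List.dedup_eq_ofList, PySem.Set.ofList]
  | append_singleton xs x ih =>
    rw [PySem.List.dedup_eq_ofList, PySem.Set.ofList, List.foldl_append, List.foldl_cons,
      List.foldl_nil, ← PySem.Set.ofList, ← PySem.List.dedup_eq_ofList,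
      PySem.Set.add_eq_ite]
    have hidx : ∀ a ∈ PySem.List.dedup xs, (xs ++ [x]).idxOf a = xs.idxOf a := by
      intro a ha
      exact List.idxOf_append_of_mem ((PySem.List.mem_dedup _ _).1 ha)
    by_cases hx : x ∈ PySem.List.dedup xs
    · simp only [hx, if_true]
      exact List.Pairwise.imp_of_mem
        (fun {a b} ha hb h => by rw [hidx a ha, hidx b hb]; exact h) ih
    · simp only [hx, if_false]
      rw [List.pairwise_append]
      refine ⟨List.Pairwise.imp_of_mem
        (fun {a b} ha hb h => by rw [hidx a ha, hidx b hb]; exact h) ih,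
        List.pairwise_singleton _ _, ?_⟩
      intro a ha b hb
      rw [List.mem_singleton] at hb
      have hax : a ∈ xs := (PySem.List.mem_dedup _ _).1 ha
      have hxx : x ∉ xs := fun h => hx ((PySem.List.mem_dedup _ _).2 h)
      rw [hb, hidx a ha, List.idxOf_append_of_notMem hxx]
      have : xs.idxOf a < xs.length := List.idxOf_lt_length_of_mem hax
      simpa using Nat.lt_of_lt_of_le this (by simp)

theorem bd_B_sorted (stream : List (String × String)) :
    (PySem.List.sorted
      (buildFirst stream stream.length PySem.Dict.empty).keys
      (fun bg => (buildFirst stream stream.length PySem.Dict.empty).getD bg 0) false)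
    = PySem.List.dedup stream := by
  set F := buildFirst stream stream.length PySem.Dict.empty with hF
  have hget : ∀ bg ∈ stream, F.getD bg 0 = ((stream.idxOf bg : Nat) : Int) := by
    intro bg hbg
    have h := buildFirst_get? stream stream.length le_rfl PySem.Dict.empty bg
    rw [List.take_length] at h
    rw [hF, PySem.Dict.getD_eq_get?_getD, h, if_pos hbg]
    rfl
  have hmem : ∀ bg, bg ∈ F.keys ↔ bg ∈ stream := by
    intro bg
    have := buildFirst_mem_keys stream stream.length le_rfl bg
    rwa [List.take_length] at this
  apply PySem.List.sorted_eq_of_perm_of_pairwise_lt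
  · rw [List.perm_ext_iff_of_nodup (PySem.List.nodup_dedup _)
      (buildFirst_nodup_keys stream stream.length PySem.Dict.empty
        (by simp [PySem.Dict.keys_empty]))]
    intro a
    rw [PySem.List.mem_dedup, hmem]
  · refine List.Pairwise.imp_of_mem ?_ (dedup_pairwise_idxOf stream)
    intro a b ha hb h
    rw [hget a ((PySem.List.mem_dedup _ _).1 ha), hget b ((PySem.List.mem_dedup _ _).1 hb)]
    exact_mod_cast h

theorem bd_main (reviews : List String) :
    bigram_dictionary reviews = bigram_dictionary_alt reviews := by
  rw [bd_A_eq]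
  unfold bigram_dictionary_alt
  have hslice : ∀ ws : List String, PySem.List.slice ws (some 1) none = ws.tail := by
    intro ws
    rw [PySem.List.slice_from ws (by norm_num : (0:Int) ≤ 1)]
    simp [List.drop_one]
  simp only [hslice, PySem.List.foldl_append_eq_flatMap, List.nil_append]
  set stream := reviews.flatMap (fun t => (extractWords t).zip (extractWords t).tail)
  rw [buildFirst_eq_pyRange stream stream.length, bd_B_sorted stream]
  rfl

-- ===== VERDICT (by name: the statement is the Claim_ definition above) =====
theorem bigram_dictionary_spec : Claim_equal_bigram_dictionary := by
  intro reviews _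
  exact bd_main reviews
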